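-- pv_equiv track=rewrite | github.com/seok-hee97/Algo-Python | programmers/Graph/방의개수.py | solution
-- ===== SOURCE A (Python) =====
-- dr = [-1, -1, 0, 1, 1, 1, 0, -1]
--
-- dc = [0, 1, 1, 1, 0, -1, -1, -1]
--
-- def solution(arrows):
--     r, c = 0, 0
--     cycle_cnt = 0
--     visited_node = set()
--     visited_node.add((0, 0))
--     visited_route = set()
--     for arrow in arrows:
--         for _ in range(2):
--             nr, nc = r+dr[arrow], c+dc[arrow]
--             if (nr, nc) in visited_node and (r, c, nr, nc) not in visited_route:
--                 cycle_cnt += 1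
--             visited_route.add((r, c, nr, nc))
--             visited_route.add((nr, nc, r, c))
--             visited_node.add((nr, nc))
--             r, c = nr, nc
--     return cycle_cnt
-- ===== SOURCE B (Python) =====
-- dr = [-1, -1, 0, 1, 1, 1, 0, -1]
--
-- dc = [0, 1, 1, 1, 0, -1, -1, -1]
--
-- def solution(arrows):
--     # Walk the same path (two half-steps per arrow), but only collect the
--     # distinct nodes and distinct undirected edges; the answer is the
--     # cyclomatic number |E| - |V| + 1 of the connected walk graph.
--     r, c = 0, 0
--     nodes = {(0, 0)}
--     edges = set()
--     for arrow in arrows: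
--         for _ in range(2):
--             nr, nc = r + dr[arrow], c + dc[arrow]
--             nodes.add((nr, nc))
--             edges.add(((r, c), (nr, nc)) if (r, c) <= (nr, nc) else ((nr, nc), (r, c)))
--             r, c = nr, nc
--     return len(edges) - len(nodes) + 1
-- ===== Notes on version B (the rewrite author's own statement) =====
-- stated objective: alternative
-- what changed: B drops A's incremental cycle counter and the symmetric directed-route bookkeeping: it just collects the distinct nodes and distinct canonicalized undirected edges of the walk and returns the cyclomatic number len(edges) - len(nodes) + 1.
import Mathlib
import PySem

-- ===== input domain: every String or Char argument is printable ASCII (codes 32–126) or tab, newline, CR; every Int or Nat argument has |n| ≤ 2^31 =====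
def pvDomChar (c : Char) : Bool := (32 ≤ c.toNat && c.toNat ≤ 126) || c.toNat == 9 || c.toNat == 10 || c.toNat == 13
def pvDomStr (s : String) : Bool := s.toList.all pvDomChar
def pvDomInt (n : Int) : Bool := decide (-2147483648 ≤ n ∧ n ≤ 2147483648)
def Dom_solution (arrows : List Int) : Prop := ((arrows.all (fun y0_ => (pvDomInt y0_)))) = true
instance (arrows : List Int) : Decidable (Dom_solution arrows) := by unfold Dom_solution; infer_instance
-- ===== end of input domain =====

-- B replaces A's incremental cycle counter and symmetric directed-route set by collecting
-- distinct nodes and canonical undirected edges and returning the cyclomatic number |E|-|V|+1.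


-- ===== PORT A =====
def pv_dr : List Int := [-1, -1, 0, 1, 1, 1, 0, -1]
def pv_dc : List Int := [0, 1, 1, 1, 0, -1, -1, -1]

structure SA where
  r : Int
  c : Int
  cnt : Int
  nodes : PySem.Set (Int × Int)
  route : PySem.Set (Int × Int × Int × Int)

-- one iteration of A's inner 'for _ in range(2)' body
def stepA (arrow : Int) (s : SA) : SA :=
  let nr := s.r + PySem.List.pyGetD pv_dr arrow 0
  let nc := s.c + PySem.List.pyGetD pv_dc arrow 0
  let cnt := if (nr, nc) ∈ s.nodes ∧ (s.r, s.c, nr, nc) ∉ s.route then s.cnt + 1 else s.cnt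
  let route := PySem.Set.add (PySem.Set.add s.route (s.r, s.c, nr, nc)) (nr, nc, s.r, s.c)
  let nodes := PySem.Set.add s.nodes (nr, nc)
  ⟨nr, nc, cnt, nodes, route⟩

def solution (arrows : List Int) : Int :=
  (arrows.foldl (fun s arrow => stepA arrow (stepA arrow s))
    ⟨0, 0, 0, PySem.Set.add PySem.Set.empty (0, 0), PySem.Set.empty⟩).cnt

-- ===== PORT B =====
-- Python tuple comparison (r,c) <= (nr,nc) is lexicographic
def pvLe (p q : Int × Int) : Bool := p.1 < q.1 || (p.1 == q.1 && p.2 ≤ q.2)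

def pvCanon (p q : Int × Int) : (Int × Int) × (Int × Int) :=
  if pvLe p q then (p, q) else (q, p)

structure SB where
  r : Int
  c : Int
  nodes : PySem.Set (Int × Int)
  edges : PySem.Set ((Int × Int) × (Int × Int))

-- one iteration of B's inner 'for _ in range(2)' body
def stepB (arrow : Int) (s : SB) : SB :=
  let nr := s.r + PySem.List.pyGetD pv_dr arrow 0
  let nc := s.c + PySem.List.pyGetD pv_dc arrow 0
  let nodes := PySem.Set.add s.nodes (nr, nc)
  let edges := PySem.Set.add s.edges (pvCanon (s.r, s.c) (nr, nc))
  ⟨nr, nc, nodes, edges⟩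

def solution_alt (arrows : List Int) : Int :=
  let s := arrows.foldl (fun s arrow => stepB arrow (stepB arrow s))
    ⟨0, 0, PySem.Set.add PySem.Set.empty (0, 0), PySem.Set.empty⟩
  (s.edges.length : Int) - (s.nodes.length : Int) + 1

-- ===== PRECONDITION & SPEC =====
-- Pre_ excludes exactly the inputs on which A raises IndexError (an arrow outside [-8, 8)).
def Pre_solution (arrows : List Int) : Prop := ∀ a ∈ arrows, -8 ≤ a ∧ a < 8
instance (arrows : List Int) : Decidable (Pre_solution arrows) := by unfold Pre_solution; infer_instance

def pvWitness_solution : List Int := [6, 6, 6, 4, 4, 4, 2, 2, 2, 0, 0, 0, 1, 6, 5, 5, 3, 6, 0]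

def Spec_solution (arrows : List Int) (out : Int) : Prop := out = solution_alt arrows
instance (arrows : List Int) (out : Int) : Decidable (Spec_solution arrows out) := by unfold Spec_solution; infer_instance

-- ===== CLAIM (what is proved, stated in full; the proofs are below) =====
def Claim_equal_solution : Prop := ∀ (arrows : List Int), Dom_solution arrows → Pre_solution arrows → Spec_solution arrows (solution arrows)

-- ===== LEMMAS AND PROOFS =====

theorem set_add_of_mem {α : Type} [BEq α] [LawfulBEq α] (s : PySem.Set α) (x : α)
    (h : x ∈ s) : PySem.Set.add s x = s := by
  simp [PySem.Set.add, h]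

theorem set_add_of_not_mem {α : Type} [BEq α] [LawfulBEq α] (s : PySem.Set α) (x : α)
    (h : ¬ x ∈ s) : PySem.Set.add s x = s ++ [x] := by
  simp [PySem.Set.add, h]

theorem pvCanon_comm (p q : Int × Int) : pvCanon p q = pvCanon q p := by
  rcases p with ⟨a, b⟩; rcases q with ⟨x, y⟩
  simp only [pvCanon, pvLe]
  split_ifs with h1 h2 h2 <;> simp_all <;> omega

theorem pvCanon_eq_or {p q u v : Int × Int} (h : pvCanon p q = (u, v)) :
    (p = u ∧ q = v) ∨ (p = v ∧ q = u) := by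
  unfold pvCanon at h
  split_ifs at h
  · exact Or.inl ⟨congrArg Prod.fst h, congrArg Prod.snd h⟩
  · exact Or.inr ⟨congrArg Prod.snd h, congrArg Prod.fst h⟩

-- the invariant tying A's state to B's state
def InvAB (a : SA) (b : SB) : Prop :=
  a.r = b.r ∧ a.c = b.c ∧ a.nodes = b.nodes ∧
  (∀ p q : Int × Int, (p.1, p.2, q.1, q.2) ∈ a.route ↔ pvCanon p q ∈ b.edges) ∧
  a.route.length = 2 * b.edges.length ∧
  a.cnt = (b.edges.length : Int) - (b.nodes.length : Int) + 1 ∧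
  (a.r, a.c) ∈ a.nodes ∧
  (∀ x y p q : Int, (x, y, p, q) ∈ a.route → (p, q) ∈ a.nodes)

theorem pv_delta_ne (arrow : Int) (h : -8 ≤ arrow ∧ arrow < 8) :
    (PySem.List.pyGetD pv_dr arrow 0, PySem.List.pyGetD pv_dc arrow 0) ≠ ((0 : Int), (0 : Int)) := by
  obtain ⟨h1, h2⟩ := h
  interval_cases arrow <;> decide

theorem step_inv (arrow : Int) (hr : -8 ≤ arrow ∧ arrow < 8) (a : SA) (b : SB)
    (h : InvAB a b) : InvAB (stepA arrow a) (stepB arrow b) := by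
  obtain ⟨hrc, hcc, hn, hroute, hlen, hcnt, hpos, hclosed⟩ := h
  have hd := pv_delta_ne arrow hr
  simp only [stepA, stepB, InvAB]
  rw [← hrc, ← hcc]
  set dR := PySem.List.pyGetD pv_dr arrow 0 with hdR
  set dC := PySem.List.pyGetD pv_dc arrow 0 with hdC
  set nr := a.r + dR with hnr
  set nc := a.c + dC with hnc
  have hmove : (a.r, a.c) ≠ (nr, nc) := by
    intro hEq
    apply hd
    have h1 : a.r = nr := congrArg Prod.fst hEq
    have h2 : a.c = nc := congrArg Prod.snd hEq
    simp only [Prod.mk.injEq]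
    constructor <;> omega
  have hnrb : nr = b.r + dR := by rw [hnr, hrc]
  have hncb : nc = b.c + dC := by rw [hnc, hcc]
  set t1 : Int × Int × Int × Int := (a.r, a.c, nr, nc) with ht1
  set t2 : Int × Int × Int × Int := (nr, nc, a.r, a.c) with ht2
  set e : (Int × Int) × (Int × Int) := pvCanon (a.r, a.c) (nr, nc) with he
  have ht12 : t1 ≠ t2 := by
    intro hEq
    apply hmove
    have := congrArg Prod.fst hEq
    have := congrArg (fun t => t.2.1) hEq
    simp_all
  have hiff1 : t1 ∈ a.route ↔ e ∈ b.edges := by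
    simpa using hroute (a.r, a.c) (nr, nc)
  have hiff2 : t2 ∈ a.route ↔ e ∈ b.edges := by
    have := hroute (nr, nc) (a.r, a.c)
    simpa [pvCanon_comm (nr, nc) (a.r, a.c), ← he] using this
  have hnodes' : PySem.Set.add a.nodes (nr, nc) = PySem.Set.add b.nodes (nr, nc) := by rw [hn]
  by_cases hmem : t1 ∈ a.route
  · -- old edge: everything unchanged
    have heE : e ∈ b.edges := hiff1.mp hmem
    have ht2mem : t2 ∈ a.route := hiff2.mpr heE
    have hnodemem : (nr, nc) ∈ a.nodes := hclosed a.r a.c nr nc hmem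
    rw [set_add_of_mem _ _ hmem, set_add_of_mem _ _ ht2mem, set_add_of_mem _ _ heE,
        set_add_of_mem _ _ hnodemem]
    have hnodeb : PySem.Set.add b.nodes (nr, nc) = b.nodes := by
      rw [← hn]; exact set_add_of_mem _ _ hnodemem
    rw [hnodeb]
    refine ⟨rfl, rfl, hn, hroute, hlen, ?_, ?_, hclosed⟩
    · simpa [hmem] using hcnt
    · exact hnodemem
  · -- new edge
    have heE : ¬ e ∈ b.edges := fun h' => hmem (hiff1.mpr h')
    have ht2mem : ¬ t2 ∈ a.route := fun h' => heE (hiff2.mp h')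
    have ht2mem' : ¬ t2 ∈ PySem.Set.add a.route t1 := by
      rw [set_add_of_not_mem _ _ hmem]
      simp [ht2mem, Ne.symm ht12]
    rw [set_add_of_not_mem _ _ heE]
    rw [set_add_of_not_mem _ _ ht2mem', set_add_of_not_mem _ _ hmem]
    have hroute' : ∀ p q : Int × Int,
        (p.1, p.2, q.1, q.2) ∈ a.route ++ [t1] ++ [t2] ↔ pvCanon p q ∈ b.edges ++ [e] := by
      intro p q
      simp only [List.mem_append, List.mem_singleton]
      constructor
      · rintro ((hin | h1) | h2)
        · exact Or.inl ((hroute p q).mp hin)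
        · right
          rcases p with ⟨p1, p2⟩; rcases q with ⟨q1, q2⟩
          have e1 : p1 = a.r := congrArg (fun t => t.1) h1
          have e2 : p2 = a.c := congrArg (fun t => t.2.1) h1
          have e3 : q1 = nr := congrArg (fun t => t.2.2.1) h1
          have e4 : q2 = nc := congrArg (fun t => t.2.2.2) h1
          subst e1; subst e2; subst e3; subst e4; rfl
        · right
          rcases p with ⟨p1, p2⟩; rcases q with ⟨q1, q2⟩
          have e1 : p1 = nr := congrArg (fun t => t.1) h2
          have e2 : p2 = nc := congrArg (fun t => t.2.1) h2
          have e3 : q1 = a.r := congrArg (fun t => t.2.2.1) h2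
          have e4 : q2 = a.c := congrArg (fun t => t.2.2.2) h2
          subst e1; subst e2; subst e3; subst e4
          exact (pvCanon_comm (nr, nc) (a.r, a.c)).symm ▸ rfl
      · rintro (hin | hEq)
        · exact Or.inl (Or.inl ((hroute p q).mpr hin))
        · have h0 : pvCanon (a.r, a.c) (nr, nc) = pvCanon p q := by rw [hEq, he]
          have hpq : pvCanon p q = (p, q) ∨ pvCanon p q = (q, p) := by
            unfold pvCanon; split_ifs <;> simp
          rcases hpq with hc | hc <;> rcases pvCanon_eq_or (h0.trans hc) with ⟨h1, h2⟩ | ⟨h1, h2⟩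
          · exact Or.inl (Or.inr (by rw [← h1, ← h2]))
          · exact Or.inr (by rw [← h1, ← h2])
          · exact Or.inr (by rw [← h2, ← h1])
          · exact Or.inl (Or.inr (by rw [← h2, ← h1]))
    have hlen' : (a.route ++ [t1] ++ [t2]).length = 2 * (b.edges ++ [e]).length := by
      simp [List.length_append]; omega
    have hclosed' : ∀ x y p q : Int,
        (x, y, p, q) ∈ a.route ++ [t1] ++ [t2] → (p, q) ∈ PySem.Set.add a.nodes (nr, nc) := by
      intro x y p q hin
      simp only [List.mem_append, List.mem_singleton] at hin
      rcases hin with (hin | h1) | h2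
      · have := hclosed x y p q hin
        simp [PySem.Set.mem_add, this]
      · have e3 : p = nr := congrArg (fun t => t.2.2.1) h1
        have e4 : q = nc := congrArg (fun t => t.2.2.2) h1
        subst e3; subst e4
        simp [PySem.Set.mem_add]
      · have e3 : p = a.r := congrArg (fun t => t.2.2.1) h2
        have e4 : q = a.c := congrArg (fun t => t.2.2.2) h2
        subst e3; subst e4
        simp [PySem.Set.mem_add, hpos]
    refine ⟨rfl, rfl, hnodes', by simpa [hn] using hroute', by simpa [hn] using hlen', ?_, ?_, hclosed'⟩
    · by_cases hnode : (nr, nc) ∈ a.nodes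
      · have : PySem.Set.add b.nodes (nr, nc) = b.nodes := by
          rw [← hn]; exact set_add_of_mem _ _ hnode
        rw [this]
        simp only [hnode, hmem, not_false_iff, and_true, if_pos trivial]
        simp [List.length_append]
        omega
      · have : PySem.Set.add b.nodes (nr, nc) = b.nodes ++ [(nr, nc)] := by
          rw [← hn]; exact set_add_of_not_mem _ _ hnode
        rw [this]
        simp only [hnode, false_and, if_false]
        simp [List.length_append]
        omega
    · simp [PySem.Set.mem_add]

theorem fold_inv (arrows : List Int) (hpre : ∀ x ∈ arrows, -8 ≤ x ∧ x < 8) (a : SA) (b : SB)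
    (h : InvAB a b) :
    InvAB (arrows.foldl (fun s arrow => stepA arrow (stepA arrow s)) a)
        (arrows.foldl (fun s arrow => stepB arrow (stepB arrow s)) b) := by
  induction arrows generalizing a b with
  | nil => simpa using h
  | cons x xs ih =>
    have hx := hpre x (List.mem_cons_self)
    simp only [List.foldl_cons]
    exact ih (fun y hy => hpre y (List.mem_cons_of_mem _ hy)) _ _
      (step_inv x hx _ _ (step_inv x hx _ _ h))

theorem init_inv : InvAB ⟨0, 0, 0, PySem.Set.add PySem.Set.empty (0, 0), PySem.Set.empty⟩
    ⟨0, 0, PySem.Set.add PySem.Set.empty (0, 0), PySem.Set.empty⟩ := by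
  refine ⟨rfl, rfl, rfl, ?_, rfl, by decide, by decide, ?_⟩
  · intro p q; simp [PySem.Set.empty]
  · intro x y p q h; simp [PySem.Set.empty] at h

-- ===== VERDICT (by name: the statement is the Claim_ definition above) =====
theorem solution_spec : Claim_equal_solution := by
  intro arrows _ hpre
  unfold Spec_solution solution solution_alt
  have := fold_inv arrows hpre _ _ init_inv
  obtain ⟨_, _, _, _, _, hcnt, _, _⟩ := this
  exact hcnt
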